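-- pv_equiv track=rewrite | github.com/Phunkafizer/RaspyRFM | apps/sensors.py | __unstuffrev
-- ===== SOURCE A (Python) =====
-- def __unstuffrev(datain):
--     cnt1bits = 0
--     obi = 0
--     oby = 0
--     result = []
--     for b in datain:
--         for ibi in range(8):
--             bit = b & 0x80
--             b <<= 1
--             if (cnt1bits >= 5) and (bit == 0):
--                 cnt1bits = 0
--                 continue
--             if (bit > 0):
--                 cnt1bits += 1
--             else:
--                 cnt1bits = 0
--             oby >>= 1
--             oby |= bit
--             obi += 1
--             if (obi == 8):
--                 obi = 0
--                 result.append(oby)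
--                 oby = 0
--     if obi > 0:
--         result.append(oby >> (8 - obi))
--
--     return result
-- ===== SOURCE B (Python) =====
-- def __unstuffrev(datain):
--     # Phase 1: flatten input into a bit stream, MSB first per byte.
--     bits = [(b >> (7 - i)) & 1 for b in datain for i in range(8)]
--     # Phase 2: drop each 0-bit that follows five consecutive 1-bits.
--     kept = []
--     cnt1bits = 0
--     for bit in bits:
--         if cnt1bits >= 5 and bit == 0:
--             cnt1bits = 0
--             continue
--         cnt1bits = cnt1bits + 1 if bit else 0
--         kept.append(bit)
--     # Phase 3: pack kept bits into bytes, LSB first; a trailing partial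
--     # chunk still yields one byte.
--     out = []
--     k = 0
--     while k < len(kept):
--         out.append(sum(v << j for j, v in enumerate(kept[k:k + 8])))
--         k += 8
--     return out
-- ===== Notes on version B (the rewrite author's own statement) =====
-- stated objective: alternative
-- what changed: Replaces A's single stateful shift-register loop (bit-accumulator oby built by right-shift/or, per-byte left-shifting of b, inline byte emission) by a three-phase pipeline: flatten bytes to an MSB-first bit list, one destuffing filter pass, then pack the kept bits LSB-first in chunks of 8.
import Mathlib
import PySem

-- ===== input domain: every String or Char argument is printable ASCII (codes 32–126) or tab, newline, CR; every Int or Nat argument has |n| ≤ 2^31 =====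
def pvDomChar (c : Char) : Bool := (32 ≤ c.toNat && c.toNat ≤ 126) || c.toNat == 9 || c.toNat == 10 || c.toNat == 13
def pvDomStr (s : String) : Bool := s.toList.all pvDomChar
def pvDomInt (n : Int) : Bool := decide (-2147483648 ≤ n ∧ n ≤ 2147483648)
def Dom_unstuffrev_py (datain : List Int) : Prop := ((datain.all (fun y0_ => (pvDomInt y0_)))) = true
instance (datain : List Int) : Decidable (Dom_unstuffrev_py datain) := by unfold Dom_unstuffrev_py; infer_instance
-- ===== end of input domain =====

-- B replaces A's single stateful shift-register loop by a three-phase pipeline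
-- (flatten to bits, destuff filter, pack LSB-first); an alternative decomposition, not claimed faster.


-- ===== PORT A =====
-- inner-loop body: state is (b, (cnt1bits, obi, oby, result)); ibi is unused, as in Python
def pvStepA (st : Int × (Int × Int × Int × List Int)) (_ibi : Int) :
    Int × (Int × Int × Int × List Int) :=
  match st with
  | (b, (cnt1bits, obi, oby, result)) =>
    let bit : Int := PySem.Int.band b 128
    let b' : Int := b <<< (1 : Nat)
    if 5 ≤ cnt1bits ∧ bit = 0 then (b', (0, obi, oby, result))
    else
      let cnt1bits' : Int := if 0 < bit then cnt1bits + 1 else 0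
      let oby' : Int := PySem.Int.bor (oby >>> (1 : Nat)) bit
      let obi' : Int := obi + 1
      if obi' = 8 then (b', (cnt1bits', 0, 0, result ++ [oby']))
      else (b', (cnt1bits', obi', oby', result))

def unstuffrev_py (datain : List Int) : List Int :=
  let st : Int × Int × Int × List Int :=
    datain.foldl
      (fun st b => ((PySem.List.pyRange 0 8 1).foldl pvStepA (b, st)).2)
      (0, 0, 0, [])
  match st with
  | (_, obi, oby, result) =>
    -- 'oby >> (8 - obi)': here 0 < obi < 8, so the Int shift amount (8-obi).toNat is exact
    if 0 < obi then result ++ [oby >>> (8 - obi).toNat] else result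

-- ===== PORT B =====
-- phase 1: [(b >> (7-i)) & 1 for b in datain for i in range(8)]; 0 ≤ 7-i, so .toNat is exact
def pvBitsB (datain : List Int) : List Int :=
  datain.flatMap (fun b =>
    (PySem.List.pyRange 0 8 1).map (fun i => PySem.Int.band (b >>> (7 - i).toNat) 1))

-- phase 2 loop body over (cnt1bits, kept)
def pvStepB (st : Int × List Int) (bit : Int) : Int × List Int :=
  if 5 ≤ st.1 ∧ bit = 0 then (0, st.2)
  else ((if bit ≠ 0 then st.1 + 1 else 0), st.2 ++ [bit])

-- sum(v << j for j, v in enumerate(chunk)); enumerate indices are ≥ 0, so .toNat is exact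
def pvPackChunk (chunk : List Int) : Int :=
  (PySem.List.enumerate chunk).foldl (fun s jv => s + jv.2 <<< jv.1.toNat) 0

-- phase 3 while-loop: out.append(pack(kept[k:k+8])); k += 8.  k stays ≥ 0
def pvPackFrom (kept : List Int) (k : Int) : List Int :=
  if k < (kept.length : Int) then
    pvPackChunk (PySem.List.slice kept (some k) (some (k + 8))) :: pvPackFrom kept (k + 8)
  else []
termination_by ((kept.length : Int) + 8 - k).toNat
decreasing_by omega

def unstuffrev_py_alt (datain : List Int) : List Int :=
  pvPackFrom ((pvBitsB datain).foldl pvStepB (0, [])).2 0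

-- ===== PRECONDITION & SPEC =====
def Spec_unstuffrev_py (datain : List Int) (out : List Int) : Prop := out = unstuffrev_py_alt datain
instance (datain : List Int) (out : List Int) : Decidable (Spec_unstuffrev_py datain out) := by unfold Spec_unstuffrev_py; infer_instance

-- ===== CLAIM (what is proved, stated in full; the proofs are below) =====
def Claim_equal_unstuffrev_py : Prop := ∀ (datain : List Int), Dom_unstuffrev_py datain → Spec_unstuffrev_py datain (unstuffrev_py datain)

-- ===== LEMMAS AND PROOFS =====

-- value of the j-th bit (from the LSB) of b, two's complement
def pvBit (b : Int) (j : Nat) : Int := (b / 2 ^ j) % 2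

-- the n top bits of a byte, MSB first, as A's left-shifting loop reads them
def pvBitsTop (b : Int) : Nat → List Int
  | 0 => []
  | n + 1 => pvBit b 7 :: pvBitsTop (b * 2) n

-- pack a bit list LSB-first into an integer
def pvPackLSB : List Int → Int
  | [] => 0
  | t :: ts => t + 2 * pvPackLSB ts

-- the full 8-bit chunks of K, packed
def pvPackFull (K : List Int) : List Int :=
  if K.length < 8 then [] else pvPackLSB (K.take 8) :: pvPackFull (K.drop 8)
termination_by K.length
decreasing_by simp only [List.length_drop]; omega

-- the trailing partial chunk of K
def pvTail (K : List Int) : List Int :=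
  if K.length < 8 then K else pvTail (K.drop 8)
termination_by K.length
decreasing_by simp only [List.length_drop]; omega

-- chunking of K in groups of 8, packed; reference form of B's phase-3 loop
def pvChunks (K : List Int) : List Int :=
  if K = [] then [] else pvPackLSB (K.take 8) :: pvChunks (K.drop 8)
termination_by K.length
decreasing_by
  simp only [List.length_drop]
  rename_i h
  have : 0 < K.length := List.length_pos_iff.mpr h
  omega

def pvIsBits (K : List Int) : Prop := ∀ t ∈ K, t = 0 ∨ t = 1

-- A's loop state as a function of B's loop state (cnt1bits, kept)
def pvAof (ck : Int × List Int) : Int × Int × Int × List Int :=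
  (ck.1, ((ck.2.length % 8 : Nat) : Int),
    pvPackLSB (pvTail ck.2) * 2 ^ (8 - ck.2.length % 8), pvPackFull ck.2)

theorem pvTail_lt (K : List Int) (h : K.length < 8) : pvTail K = K := by
  rw [pvTail, if_pos h]

theorem pvTail_ge (K : List Int) (h : ¬ K.length < 8) : pvTail K = pvTail (K.drop 8) := by
  conv_lhs => rw [pvTail]
  rw [if_neg h]

theorem pvPackFull_lt (K : List Int) (h : K.length < 8) : pvPackFull K = [] := by
  rw [pvPackFull, if_pos h]

theorem pvPackFull_ge (K : List Int) (h : ¬ K.length < 8) :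
    pvPackFull K = pvPackLSB (K.take 8) :: pvPackFull (K.drop 8) := by
  conv_lhs => rw [pvPackFull]
  rw [if_neg h]

theorem pv_band1 (y : Int) : PySem.Int.band y 1 = y % 2 := by
  unfold PySem.Int.band
  by_cases hy : 0 ≤ y
  · simp only [hy, if_true, if_pos (by norm_num : (0:Int) ≤ 1)]
    rw [show (Int.toNat 1) = 1 from rfl, Nat.and_one_is_mod]
    omega
  · simp only [hy, if_false, if_pos (by norm_num : (0:Int) ≤ 1)]
    rw [show (Int.toNat 1) = 1 from rfl, Nat.one_and_eq_mod_two]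
    omega

theorem pv_testbit7 (m : Nat) : m &&& 128 = (m / 128 % 2) * 128 := by
  have h := Nat.and_two_pow m 7
  rw [Nat.testBit_eq_decide_div_mod_eq] at h
  norm_num at h
  rcases Nat.mod_two_eq_zero_or_one (m / 128) with h2 | h2 <;> simp [h2] at h <;> omega

theorem pv_band128 (y : Int) : PySem.Int.band y 128 = 128 * ((y / 128) % 2) := by
  unfold PySem.Int.band
  by_cases hy : 0 ≤ y
  · simp only [hy, if_true, if_pos (by norm_num : (0:Int) ≤ 128)]
    rw [show ((128:Int).toNat) = 128 from rfl, pv_testbit7]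
    omega
  · simp only [hy, if_false, if_pos (by norm_num : (0:Int) ≤ 128)]
    rw [show ((128:Int).toNat) = 128 from rfl, Nat.and_comm, pv_testbit7]
    omega

theorem pv_bor (x t : Int) (hx : 0 ≤ x) (hx' : x < 128) (ht : t = 0 ∨ t = 1) :
    PySem.Int.bor x (128 * t) = x + 128 * t := by
  rcases ht with ht | ht <;> subst ht
  · unfold PySem.Int.bor
    norm_num [hx]
  · unfold PySem.Int.bor
    rw [if_pos hx, if_pos (by norm_num)]
    have hlt : x.toNat < 128 := by omega
    have h128 : ∀ n < 128, n ||| 128 = n + 128 := by decide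
    rw [show ((128 * 1 : Int)).toNat = 128 from rfl, h128 x.toNat hlt]
    omega

theorem pv_bit01 (b : Int) (j : Nat) : pvBit b j = 0 ∨ pvBit b j = 1 := by
  unfold pvBit; omega

theorem pv_packLSB_nonneg (K : List Int) (h : pvIsBits K) : 0 ≤ pvPackLSB K := by
  induction K with
  | nil => simp [pvPackLSB]
  | cons t ts ih =>
    have h1 := h t (by simp)
    have h2 := ih (fun x hx => h x (by simp [hx]))
    simp only [pvPackLSB]; rcases h1 with h1 | h1 <;> omega

theorem pv_packLSB_lt (K : List Int) (h : pvIsBits K) : pvPackLSB K < 2 ^ K.length := by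
  induction K with
  | nil => simp [pvPackLSB]
  | cons t ts ih =>
    have h1 := h t (by simp)
    have h2 := ih (fun x hx => h x (by simp [hx]))
    simp only [pvPackLSB, List.length_cons, pow_succ]
    rcases h1 with h1 | h1 <;> omega

theorem pv_packLSB_append (K : List Int) (t : Int) :
    pvPackLSB (K ++ [t]) = pvPackLSB K + t * 2 ^ K.length := by
  induction K with
  | nil => simp [pvPackLSB]
  | cons x xs ih => simp only [List.cons_append, pvPackLSB, ih, List.length_cons, pow_succ]; ring

theorem pv_tail_len (K : List Int) : (pvTail K).length = K.length % 8 := by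
  induction K using pvTail.induct with
  | case1 K h => rw [pvTail_lt K h]; omega
  | case2 K h ih => rw [pvTail_ge K h, ih]; simp only [List.length_drop]; omega

theorem pv_tail_bits (K : List Int) (h : pvIsBits K) : pvIsBits (pvTail K) := by
  induction K using pvTail.induct with
  | case1 K h' => rwa [pvTail_lt K h']
  | case2 K h' ih => rw [pvTail_ge K h']; exact ih (fun x hx => h x (List.mem_of_mem_drop hx))

theorem pv_tail_append (K : List Int) (t : Int) (h : K.length % 8 < 7) :
    pvTail (K ++ [t]) = pvTail K ++ [t] := by
  induction K using pvTail.induct with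
  | case1 K h' =>
    rw [pvTail_lt _ (by simp; omega), pvTail_lt K h']
  | case2 K h' ih =>
    rw [pvTail_ge _ (by simp; omega), pvTail_ge K h',
      List.drop_append_of_le_length (by omega)]
    exact ih (by simp only [List.length_drop]; omega)

theorem pv_tail_append7 (K : List Int) (t : Int) (h : K.length % 8 = 7) :
    pvTail (K ++ [t]) = [] := by
  induction K using pvTail.induct with
  | case1 K h' =>
    rw [pvTail_ge _ (by simp; omega), List.drop_of_length_le (by simp; omega)]
    simp [pvTail_lt]
  | case2 K h' ih =>
    rw [pvTail_ge _ (by simp; omega), List.drop_append_of_le_length (by omega)]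
    exact ih (by simp only [List.length_drop]; omega)

theorem pv_packFull_append (K : List Int) (t : Int) (h : K.length % 8 < 7) :
    pvPackFull (K ++ [t]) = pvPackFull K := by
  induction K using pvPackFull.induct with
  | case1 K h' => rw [pvPackFull_lt _ (by simp; omega), pvPackFull_lt K h']
  | case2 K h' ih =>
    rw [pvPackFull_ge _ (by simp; omega), pvPackFull_ge K h',
      List.drop_append_of_le_length (by omega), List.take_append_of_le_length (by omega),
      ih (by simp only [List.length_drop]; omega)]

theorem pv_packFull_append7 (K : List Int) (t : Int) (h : K.length % 8 = 7) :
    pvPackFull (K ++ [t]) = pvPackFull K ++ [pvPackLSB (pvTail K ++ [t])] := by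
  induction K using pvPackFull.induct with
  | case1 K h' =>
    rw [pvPackFull_ge _ (by simp; omega), List.take_of_length_le (by simp; omega),
      List.drop_of_length_le (by simp; omega), pvPackFull_lt K h', pvPackFull_lt [] (by simp),
      pvTail_lt K h']
    simp
  | case2 K h' ih =>
    rw [pvPackFull_ge _ (by simp; omega), pvPackFull_ge K h',
      List.drop_append_of_le_length (by omega), List.take_append_of_le_length (by omega),
      ih (by simp only [List.length_drop]; omega), pvTail_ge K h']
    simp

-- the single-bit step of A, expressed through B's step on (cnt1bits, kept)
theorem pv_stepBit (c : Int) (K : List Int) (hK : pvIsBits K) (t : Int) (ht : t = 0 ∨ t = 1)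
    (b : Int) (hb : pvBit b 7 = t) (i : Int) :
    pvStepA (b, pvAof (c, K)) i = (b <<< (1 : Nat), pvAof (pvStepB (c, K) t)) := by
  have hbit : PySem.Int.band b 128 = 128 * t := by
    rw [pv_band128]
    unfold pvBit at hb
    norm_num at hb
    rw [hb]
  set r : Nat := K.length % 8 with hr
  have hrlt : r < 8 := Nat.mod_lt _ (by norm_num)
  have hp := pv_tail_len K
  have hpb := pv_tail_bits K hK
  have hy0 : 0 ≤ pvPackLSB (pvTail K) := pv_packLSB_nonneg _ hpb
  have hylt : pvPackLSB (pvTail K) < 2 ^ r := by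
    have := pv_packLSB_lt _ hpb
    rwa [hp] at this
  simp only [pvStepA, pvAof, hbit]
  by_cases hskip : 5 ≤ c ∧ (128 : Int) * t = 0
  · rw [if_pos hskip]
    have ht0 : t = 0 := by rcases ht with h | h; exact h; omega
    unfold pvStepB
    rw [if_pos ⟨hskip.1, ht0⟩]
  · rw [if_neg hskip]
    have hyd : (pvPackLSB (pvTail K) * 2 ^ (8 - r)) >>> (1:Nat)
        = pvPackLSB (pvTail K) * 2 ^ (7 - r) := by
      rw [Int.shiftRight_eq_div_pow]
      have : (8 - r) = (7 - r) + 1 := by omega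
      rw [this, pow_succ]
      push_cast
      rw [← mul_assoc, Int.mul_ediv_cancel _ (by norm_num)]
    have hbor : PySem.Int.bor (pvPackLSB (pvTail K) * 2 ^ (7 - r)) (128 * t)
        = pvPackLSB (pvTail K) * 2 ^ (7 - r) + 128 * t := by
      apply pv_bor _ _ (by positivity) _ ht
      calc pvPackLSB (pvTail K) * 2 ^ (7 - r) < 2 ^ r * 2 ^ (7 - r) := by
            apply mul_lt_mul_of_pos_right hylt (by positivity)
        _ ≤ 128 := by
            rw [← pow_add]
            have : r + (7 - r) ≤ 7 := by omega
            calc (2:Int) ^ (r + (7-r)) ≤ 2 ^ 7 := by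
                  apply pow_le_pow_right₀ (by norm_num) this
              _ = 128 := by norm_num
    have hcnt : (if (0:Int) < 128 * t then c + 1 else (0:Int)) = (if t ≠ 0 then c + 1 else 0) := by
      rcases ht with h | h <;> subst h <;> norm_num
    unfold pvStepB
    have hskip' : ¬ (5 ≤ c ∧ t = 0) := by
      intro hcon
      exact hskip ⟨hcon.1, by rw [hcon.2]; ring⟩
    rw [if_neg hskip']
    by_cases hr7 : r = 7
    · rw [if_pos (by rw [← hr]; push_cast; omega)]
      simp only [Prod.mk.injEq]
      have hlen : (K ++ [t]).length % 8 = 0 := by simp [← hr]; omega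
      refine ⟨trivial, hcnt, by rw [hlen]; norm_num, ?_, ?_⟩
      · rw [hlen, pv_tail_append7 K t (by omega)]
        simp [pvPackLSB]
      · rw [pv_packFull_append7 K t (by omega), ← hr, hyd, hbor,
          pv_packLSB_append, hp, ← hr, hr7]
        norm_num
        ring
    · rw [if_neg (by rw [← hr]; push_cast; omega)]
      simp only [Prod.mk.injEq]
      have hlen : (K ++ [t]).length % 8 = r + 1 := by simp [← hr]; omega
      refine ⟨trivial, hcnt, ?_, ?_, (pv_packFull_append K t (by omega)).symm⟩
      · rw [hlen, ← hr]; push_cast; ring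
      · rw [hlen, ← hr, hyd, hbor, pv_tail_append K t (by omega),
          pv_packLSB_append, hp, ← hr]
        have h8 : 8 - (r + 1) = 7 - r := by omega
        rw [h8, add_mul, mul_assoc, ← pow_add]
        have h7 : r + (7 - r) = 7 := by omega
        rw [h7]
        norm_num
        ring

-- B's phase-2 step keeps the kept list a bit list
theorem pv_stepB_bits (c : Int) (K : List Int) (hK : pvIsBits K) (t : Int) (ht : t = 0 ∨ t = 1) :
    pvIsBits (pvStepB (c, K) t).2 := by
  unfold pvStepB pvIsBits
  split
  · exact hK
  · intro x hx
    simp only [List.mem_append, List.mem_singleton] at hx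
    rcases hx with hx | hx
    · exact hK x hx
    · subst hx; exact ht

theorem pv_foldB_bits (s : List Int) (hs : pvIsBits s) :
    ∀ ck : Int × List Int, pvIsBits ck.2 → pvIsBits (s.foldl pvStepB ck).2 := by
  induction s with
  | nil => intro ck h; simpa using h
  | cons t ts ih =>
    intro ck h
    simp only [List.foldl_cons]
    exact ih (fun x hx => hs x (by simp [hx]))
      _ (pv_stepB_bits ck.1 ck.2 h t (hs t (by simp)))

theorem pv_bitsTop_bits (b : Int) (n : Nat) : pvIsBits (pvBitsTop b n) := by
  induction n generalizing b with
  | zero => intro t ht; simp [pvBitsTop] at ht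
  | succ n ih =>
    intro t ht
    simp only [pvBitsTop, List.mem_cons] at ht
    rcases ht with ht | ht
    · subst ht; exact pv_bit01 b 7
    · exact ih (b * 2) t ht

-- A's inner loop over one byte, as B's filter step over that byte's bit list
theorem pv_byte (l : List Int) : ∀ (b c : Int) (K : List Int), pvIsBits K →
    l.foldl pvStepA (b, pvAof (c, K))
      = (b <<< l.length, pvAof ((pvBitsTop b l.length).foldl pvStepB (c, K))) := by
  induction l with
  | nil => intro b c K _; simp [pvBitsTop]
  | cons i l ih =>
    intro b c K hK
    simp only [List.foldl_cons]
    rw [pv_stepBit c K hK (pvBit b 7) (pv_bit01 b 7) b rfl i]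
    have hb2 : b <<< (1 : Nat) = b * 2 := by rw [Int.shiftLeft_eq]; norm_num
    have hbits : pvIsBits (pvStepB (c, K) (pvBit b 7)).2 :=
      pv_stepB_bits c K hK _ (pv_bit01 b 7)
    rw [hb2, ih (b * 2) (pvStepB (c, K) (pvBit b 7)).1 (pvStepB (c, K) (pvBit b 7)).2 hbits]
    simp only [pvBitsTop, List.length_cons, List.foldl_cons]
    refine Prod.ext ?_ rfl
    show (b * 2) <<< l.length = b <<< (l.length + 1)
    rw [Int.shiftLeft_eq, Int.shiftLeft_eq, pow_succ]
    ring

-- A's whole loop nest, as B's filter over the flattened bit stream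
theorem pv_outer (datain : List Int) : ∀ (c : Int) (K : List Int), pvIsBits K →
    datain.foldl (fun st b => ((PySem.List.pyRange 0 8 1).foldl pvStepA (b, st)).2)
        (pvAof (c, K))
      = pvAof ((datain.flatMap (fun b => pvBitsTop b 8)).foldl pvStepB (c, K)) := by
  induction datain with
  | nil => intro c K _; rfl
  | cons b ds ih =>
    intro c K hK
    simp only [List.foldl_cons, List.flatMap_cons, List.foldl_append]
    have h8 : (PySem.List.pyRange 0 8 1).length = 8 := rfl
    have := pv_byte (PySem.List.pyRange 0 8 1) b c K hK
    rw [h8] at this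
    rw [this]
    have hbits : pvIsBits ((pvBitsTop b 8).foldl pvStepB (c, K)).2 :=
      pv_foldB_bits (pvBitsTop b 8) (pv_bitsTop_bits b 8) (c, K) hK
    have := ih ((pvBitsTop b 8).foldl pvStepB (c, K)).1
      ((pvBitsTop b 8).foldl pvStepB (c, K)).2 hbits
    simpa using this

-- B's phase-1 list for one byte is exactly the byte's top-bit list
theorem pv_bitsB_eq (datain : List Int) :
    pvBitsB datain = datain.flatMap (fun b => pvBitsTop b 8) := by
  unfold pvBitsB
  refine List.flatMap_congr (fun b _ => ?_)
  rw [show PySem.List.pyRange 0 8 1 = [0,1,2,3,4,5,6,7] from rfl]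
  simp only [List.map_cons, List.map_nil, pv_band1, Int.shiftRight_eq_div_pow, pvBitsTop]
  norm_num [pvBit, show Int.toNat 0 = 0 from rfl, show Int.toNat 1 = 1 from rfl, show Int.toNat 2 = 2 from rfl, show Int.toNat 3 = 3 from rfl, show Int.toNat 4 = 4 from rfl, show Int.toNat 5 = 5 from rfl, show Int.toNat 6 = 6 from rfl, show Int.toNat 7 = 7 from rfl]
  omega

theorem pv_enum_fold (l : List Int) : ∀ (a : Nat) (s : Int),
    (PySem.List.enumerate l (a : Int)).foldl (fun s jv => s + jv.2 <<< jv.1.toNat) s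
      = s + pvPackLSB l * 2 ^ a := by
  induction l with
  | nil => intro a s; simp [PySem.List.enumerate, pvPackLSB]
  | cons x xs ih =>
    intro a s
    rw [PySem.List.enumerate_cons]
    simp only [List.foldl_cons]
    rw [show ((a : Int) + 1) = ((a + 1 : Nat) : Int) by push_cast; ring, ih]
    simp only [pvPackLSB, Int.toNat_natCast, Int.shiftLeft_eq, pow_succ]
    ring

theorem pv_packChunk (l : List Int) : pvPackChunk l = pvPackLSB l := by
  unfold pvPackChunk
  have h := pv_enum_fold l 0 (((0 : Nat) : Int))
  norm_num at h
  convert h using 2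

theorem pvChunks_nil : pvChunks [] = [] := by
  rw [pvChunks]
  simp

-- B's phase-3 loop from index k is the chunking of kept.drop k
theorem pv_packFrom_eq (n : Nat) : ∀ (K : List Int) (k : Nat), K.length ≤ k + n →
    pvPackFrom K (k : Int) = pvChunks (K.drop k) := by
  induction n with
  | zero =>
    intro K k hk
    rw [pvPackFrom, if_neg (by push_cast; omega), List.drop_of_length_le (by omega), pvChunks_nil]
  | succ n ih =>
    intro K k hk
    by_cases hlt : k < K.length
    · rw [pvPackFrom, if_pos (by push_cast; omega),
        show ((k : Int) + 8) = ((k : Nat) : Int) + ((8 : Nat) : Int) by push_cast; ring,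
        PySem.List.slice_natCast_add, pv_packChunk,
        show ((k : Int) + ((8:Nat) : Int)) = (((k + 8 : Nat)) : Int) by push_cast; ring,
        ih K (k + 8) (by omega)]
      conv_rhs => rw [pvChunks]
      rw [if_neg (by intro hc; have := congrArg List.length hc; simp at this; omega)]
      rw [List.drop_drop]
    · rw [pvPackFrom, if_neg (by push_cast; omega), List.drop_of_length_le (by omega), pvChunks_nil]

-- the chunking computes the packed full chunks plus the packed partial tail
theorem pv_pack_eq (n : Nat) : ∀ (K : List Int), K.length ≤ n →
    pvChunks K = pvPackFull K ++ (if K.length % 8 = 0 then [] else [pvPackLSB (pvTail K)]) := by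
  induction n with
  | zero =>
    intro K hK
    have : K = [] := List.eq_nil_of_length_eq_zero (by omega)
    subst this
    rw [pvChunks]
    simp [pvPackFull_lt]
  | succ n ih =>
    intro K hK
    by_cases hnil : K = []
    · subst hnil
      rw [pvChunks]
      simp [pvPackFull_lt]
    · rw [pvChunks, if_neg hnil]
      have hpos : 0 < K.length := List.length_pos_iff.mpr hnil
      by_cases hlt : K.length < 8
      · rw [List.take_of_length_le (by omega), List.drop_of_length_le (by omega), pvChunks_nil,
          pvPackFull_lt K hlt, pvTail_lt K hlt, if_neg (by omega)]
        simp
      · rw [ih (K.drop 8) (by simp only [List.length_drop]; omega)]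
        rw [pvPackFull_ge K hlt, pvTail_ge K hlt]
        have hmod : (K.drop 8).length % 8 = K.length % 8 := by
          simp only [List.length_drop]; omega
        rw [hmod]
        simp

theorem pv_packFrom_zero (K : List Int) : pvPackFrom K 0 = pvChunks K := by
  have h := pv_packFrom_eq K.length K 0 (by omega)
  norm_num at h
  exact h

theorem pv_Aof_nil : pvAof (0, []) = ((0 : Int), (0 : Int), (0 : Int), ([] : List Int)) := by
  unfold pvAof
  rw [pvTail_lt [] (by simp), pvPackFull_lt [] (by simp)]
  simp [pvPackLSB]

-- A's final partial-byte append equals B's packing of the kept tail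
theorem pv_final (K : List Int) :
    (if 0 < ((K.length % 8 : Nat) : Int)
     then pvPackFull K ++
       [(pvPackLSB (pvTail K) * 2 ^ (8 - K.length % 8)) >>> ((8 - ((K.length % 8 : Nat) : Int)).toNat)]
     else pvPackFull K) = pvChunks K := by
  set r : Nat := K.length % 8 with hr
  have hrlt : r < 8 := Nat.mod_lt _ (by norm_num)
  rw [pv_pack_eq K.length K (le_refl _), ← hr]
  by_cases hr0 : r = 0
  · simp only [hr0]
    norm_num
  · rw [if_pos (by push_cast; omega), if_neg hr0]
    congr 1
    congr 1
    have htn : ((8 : Int) - (r : Nat)).toNat = 8 - r := by omega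
    rw [htn, Int.shiftRight_eq_div_pow]
    push_cast
    exact Int.mul_ediv_cancel _ (by positivity)

-- ===== VERDICT (by name: the statement is the Claim_ definition above) =====
theorem unstuffrev_py_spec : Claim_equal_unstuffrev_py := by
  intro datain _
  unfold Spec_unstuffrev_py unstuffrev_py unstuffrev_py_alt
  rw [show ((0,0,0,[]) : Int × Int × Int × List Int) = pvAof (0, []) from pv_Aof_nil.symm]
  rw [pv_outer datain 0 [] (by intro t ht; simp at ht)]
  rw [← pv_bitsB_eq]
  rcases hA : pvAof ((pvBitsB datain).foldl pvStepB (0, [])) with ⟨c', o', y', res'⟩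
  show (if 0 < o' then res' ++ [y' >>> ((8 - o').toNat)] else res')
    = pvPackFrom ((pvBitsB datain).foldl pvStepB (0, [])).2 0
  rw [pv_packFrom_zero]
  unfold pvAof at hA
  simp only [Prod.mk.injEq] at hA
  obtain ⟨h1, h2, h3, h4⟩ := hA
  rw [← h2, ← h3, ← h4]
  exact pv_final ((pvBitsB datain).foldl pvStepB (0, [])).2
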